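-- pv_equiv track=rewrite | github.com/javmunozm/Random | ml_models/s1_modification_backtest.py | series_comparison
-- ===== SOURCE A (Python) =====
-- def series_comparison(baseline_bests, test_bests):
--     """Count series improved, same, degraded."""
--     improved = same = degraded = 0
--     for b, t in zip(baseline_bests, test_bests):
--         if t > b:
--             improved += 1
--         elif t < b:
--             degraded += 1
--         else:
--             same += 1
--     return improved, same, degraded
-- ===== SOURCE B (Python) =====
-- def series_comparison(baseline_bests, test_bests):
--     """Count series improved, same, degraded."""
--     pairs = list(zip(baseline_bests, test_bests))
--     improved = sum(1 for b, t in pairs if t > b)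
--     degraded = sum(1 for b, t in pairs if t < b)
--     return improved, len(pairs) - improved - degraded, degraded
-- ===== Notes on version B (the rewrite author's own statement) =====
-- stated objective: simpler
-- what changed: Replaces the single pass with three mutable accumulators and a three-way branch by two branch-free staged counting passes (sum over a filtered generator) plus deriving 'same' arithmetically as len - improved - degraded.
import Mathlib
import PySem

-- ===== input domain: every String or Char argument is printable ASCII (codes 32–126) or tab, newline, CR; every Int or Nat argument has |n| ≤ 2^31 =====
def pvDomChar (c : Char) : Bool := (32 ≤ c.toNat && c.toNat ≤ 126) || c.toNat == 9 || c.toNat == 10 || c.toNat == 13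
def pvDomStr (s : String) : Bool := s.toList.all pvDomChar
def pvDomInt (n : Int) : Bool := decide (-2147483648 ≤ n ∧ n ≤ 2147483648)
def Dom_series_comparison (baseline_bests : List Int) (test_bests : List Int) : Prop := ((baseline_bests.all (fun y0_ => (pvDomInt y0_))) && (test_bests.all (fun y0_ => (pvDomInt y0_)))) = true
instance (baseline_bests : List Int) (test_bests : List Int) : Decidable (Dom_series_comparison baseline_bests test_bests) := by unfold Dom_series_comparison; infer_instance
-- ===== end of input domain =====

-- B replaces the single three-accumulator branching pass by two staged branch-free counting passes, deriving 'same' as len - improved - degraded (simpler; same cost).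

-- ===== PORT A =====
def series_comparison (baseline_bests : List Int) (test_bests : List Int) : Int × Int × Int :=
  (baseline_bests.zip test_bests).foldl
    (fun acc p =>
      if p.2 > p.1 then (acc.1 + 1, acc.2.1, acc.2.2)
      else if p.2 < p.1 then (acc.1, acc.2.1, acc.2.2 + 1)
      else (acc.1, acc.2.1 + 1, acc.2.2))
    (0, 0, 0)

-- ===== PORT B =====
def series_comparison_alt (baseline_bests : List Int) (test_bests : List Int) : Int × Int × Int :=
  let pairs := baseline_bests.zip test_bests
  let improved : Int := pairs.countP (fun p => p.2 > p.1)
  let degraded : Int := pairs.countP (fun p => p.2 < p.1)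
  (improved, (pairs.length : Int) - improved - degraded, degraded)

-- ===== PRECONDITION & SPEC =====
def Spec_series_comparison (baseline_bests : List Int) (test_bests : List Int) (out : Int × Int × Int) : Prop := out = series_comparison_alt baseline_bests test_bests
instance (baseline_bests : List Int) (test_bests : List Int) (out : Int × Int × Int) : Decidable (Spec_series_comparison baseline_bests test_bests out) := by unfold Spec_series_comparison; infer_instance

-- ===== CLAIM =====
def Claim_equal_series_comparison : Prop := ∀ (baseline_bests : List Int) (test_bests : List Int), Dom_series_comparison baseline_bests test_bests → Spec_series_comparison baseline_bests test_bests (series_comparison baseline_bests test_bests)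

-- ===== LEMMAS AND PROOFS =====

-- A's fold adds the improved/same/degraded tallies to its accumulator, with 'same'
-- expressed as length minus the other two counts (matching B's decomposition).
theorem series_foldA (l : List (Int × Int)) (i s d : Int) :
    l.foldl
      (fun acc p =>
        if p.2 > p.1 then (acc.1 + 1, acc.2.1, acc.2.2)
        else if p.2 < p.1 then (acc.1, acc.2.1, acc.2.2 + 1)
        else (acc.1, acc.2.1 + 1, acc.2.2))
      (i, s, d)
    = (i + (l.countP (fun p => p.2 > p.1) : Nat),
       s + ((l.length : Int) - (l.countP (fun p => p.2 > p.1) : Nat) - (l.countP (fun p => p.2 < p.1) : Nat)),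
       d + (l.countP (fun p => p.2 < p.1) : Nat)) := by
  induction l generalizing i s d with
  | nil => simp
  | cons p rest ih =>
    simp only [List.foldl_cons, List.countP_cons, List.length_cons]
    by_cases h1 : p.2 > p.1
    · rw [if_pos h1, ih]
      simp only [decide_eq_true h1, decide_eq_false (not_lt_of_gt h1), if_true, if_false,
        Prod.mk.injEq]
      refine ⟨by push_cast; ring, by push_cast; ring, by push_cast; ring⟩
    · by_cases h2 : p.2 < p.1
      · rw [if_neg h1, if_pos h2, ih]
        simp only [decide_eq_false h1, decide_eq_true h2, if_true, if_false, Prod.mk.injEq]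
        refine ⟨by push_cast; ring, by push_cast; ring, by push_cast; ring⟩
      · rw [if_neg h1, if_neg h2, ih]
        simp only [decide_eq_false h1, decide_eq_false h2, if_false, Prod.mk.injEq]
        refine ⟨by push_cast; ring, by push_cast; ring, by push_cast; ring⟩

-- ===== VERDICT =====
theorem series_comparison_spec : Claim_equal_series_comparison := by
  intro bs ts _
  unfold Spec_series_comparison series_comparison series_comparison_alt
  rw [series_foldA]
  simp only [Prod.mk.injEq]
  refine ⟨by ring, by ring, by ring⟩
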